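-- pv_equiv track=rewrite | github.com/HengHuH/pycode | merge_fun.py | convert_co_consts
-- ===== SOURCE A (Python) =====
-- import opcode
--
-- def convert_co_consts(opbytes, context, data):
--     """由于合并了co_consts,常量读取的位置变更"""
--     _arg = 0
--     _byte = opbytes[-2]
--     for i in range(-1, -len(opbytes), -2):
--         _arg |= opbytes[i] << (abs(i) // 2 * 8)
--
--     offset = len(context.get("co_consts"))
--     _arg += offset
--
--     res = []
--     if _arg == 0:
--         res = [_byte, 0]
--     while _arg > 0:
--         word = _arg & 0xFF
--         _arg = _arg >> 8
--         if res:
--             res = [opcode.EXTENDED_ARG, word] + res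
--         else:
--             res = [_byte, word]
--     return res, (len(res) - len(opbytes)) // 2
-- ===== SOURCE B (Python) =====
-- EXTENDED_ARG = 144  # value of opcode.EXTENDED_ARG
--
--
-- def convert_co_consts(opbytes, context, data):
--     """由于合并了co_consts,常量读取的位置变更"""
--     op = opbytes[-2]
--
--     # decode: the argument bytes are a slice, little-endian
--     digits = opbytes[-1:0:-2]
--     arg = 0
--     for j, b in enumerate(digits):
--         arg |= b << (8 * j)
--     arg += len(context.get("co_consts"))
--
--     # re-encode: extract the byte digits of the new argument
--     words = []
--     t = arg
--     while t > 0: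
--         words.append(t & 0xFF)
--         t >>= 8
--     if arg == 0:
--         words = [0]
--
--     # assemble: EXTENDED_ARG prefixes, most significant first, then the opcode
--     res = [x for w in reversed(words[1:]) for x in (EXTENDED_ARG, w)]
--     res += [op, words[0]] if words else []
--     return res, (len(res) - len(opbytes)) // 2
-- ===== Notes on version B (the rewrite author's own statement) =====
-- stated objective: simpler
-- what changed: A's single interleaved while-loop (manual negative-index bit-shift decode, then prepend-as-you-shift assembly) is split into three plain passes: decode the argument from the slice opbytes[-1:0:-2], extract the byte digits into a list, then assemble the EXTENDED_ARG prefixes with a comprehension.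
import Mathlib
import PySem

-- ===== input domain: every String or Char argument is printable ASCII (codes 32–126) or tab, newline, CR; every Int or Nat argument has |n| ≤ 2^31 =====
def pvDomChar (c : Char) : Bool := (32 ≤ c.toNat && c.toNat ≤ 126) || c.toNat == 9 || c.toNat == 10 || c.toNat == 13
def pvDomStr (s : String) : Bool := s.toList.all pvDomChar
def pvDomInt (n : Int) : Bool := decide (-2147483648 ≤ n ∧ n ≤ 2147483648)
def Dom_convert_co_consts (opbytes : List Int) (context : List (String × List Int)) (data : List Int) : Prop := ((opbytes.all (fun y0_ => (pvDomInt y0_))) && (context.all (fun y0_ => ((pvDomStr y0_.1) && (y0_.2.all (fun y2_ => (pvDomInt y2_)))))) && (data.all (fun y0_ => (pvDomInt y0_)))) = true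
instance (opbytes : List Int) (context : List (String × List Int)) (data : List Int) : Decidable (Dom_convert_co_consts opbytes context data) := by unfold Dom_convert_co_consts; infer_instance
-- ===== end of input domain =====

-- B re-decomposes A's interleaved while-loop into three separate passes (slice-decode, digit
-- extraction, comprehension assembly); objective: simpler — same cost, no speed claim.

-- termination fact for both while-loops (cited by the ports' `decreasing_by`)
theorem pvShiftToNat_lt (t : Int) (h : 0 < t) : (t >>> (8 : Nat)).toNat < t.toNat := by
  have hd : t >>> (8 : Nat) = t / (256 : Int) := by
    have h8 := Int.shiftRight_eq_div_pow t 8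
    norm_num at h8
    exact h8
  omega

-- ===== PORT A =====
-- the while-loop of A: prepends [EXTENDED_ARG, word] (opcode.EXTENDED_ARG = 144)
def pvLoopA (arg byte : Int) (res : List Int) : List Int :=
  if h : 0 < arg then
    pvLoopA (arg >>> (8 : Nat)) byte
      (if res = [] then [byte, PySem.Int.band arg 255] else 144 :: PySem.Int.band arg 255 :: res)
  else res
termination_by arg.toNat
decreasing_by exact pvShiftToNat_lt arg h

def convert_co_consts (opbytes : List Int) (context : List (String × List Int)) (data : List Int) : List Int × Int :=
  let _byte := PySem.List.pyGetD opbytes (-2) 0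
  let _arg : Int := (PySem.List.pyRange (-1) (-(opbytes.length : Int)) (-2)).foldl
      (fun a i => PySem.Int.bor a (PySem.List.pyGetD opbytes i 0 <<< (i.natAbs / 2 * 8))) 0
  let offset : Int := ((PySem.Dict.get? (PySem.Dict.mk context) "co_consts").getD []).length
  let _arg2 := _arg + offset
  let res0 : List Int := if _arg2 = 0 then [_byte, 0] else []
  let res := pvLoopA _arg2 _byte res0
  (res, PySem.Int.floordiv ((res.length : Int) - (opbytes.length : Int)) 2)

-- ===== PORT B =====
-- the while-loop of B: collects the little-endian byte digits of t
def pvWordsB (t : Int) (words : List Int) : List Int :=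
  if h : 0 < t then pvWordsB (t >>> (8 : Nat)) (words ++ [PySem.Int.band t 255]) else words
termination_by t.toNat
decreasing_by exact pvShiftToNat_lt t h

def convert_co_consts_alt (opbytes : List Int) (context : List (String × List Int)) (data : List Int) : List Int × Int :=
  let op := PySem.List.pyGetD opbytes (-2) 0
  let digits := (PySem.List.slice? opbytes (some (-1)) (some 0) (-2)).getD []
  let arg : Int := (PySem.List.enumerate digits).foldl
      (fun a p => PySem.Int.bor a (p.2 <<< (8 * p.1).toNat)) 0
  let arg2 := arg + (((PySem.Dict.get? (PySem.Dict.mk context) "co_consts").getD []).length : Int)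
  let words0 := pvWordsB arg2 []
  let words := if arg2 = 0 then [0] else words0
  let pfx := ((PySem.List.slice words (some 1) none).reverse).flatMap (fun w => [144, w])
  let res := pfx ++ (match words with | [] => [] | w0 :: _ => [op, w0])
  (res, PySem.Int.floordiv ((res.length : Int) - (opbytes.length : Int)) 2)

-- ===== PRECONDITION & SPEC =====
-- Pre_ excludes exactly the inputs on which A raises: IndexError from opbytes[-2] when
-- len(opbytes) < 2, and TypeError from len(context.get("co_consts")) when the key is absent.
def Pre_convert_co_consts (opbytes : List Int) (context : List (String × List Int)) (data : List Int) : Prop :=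
  2 ≤ opbytes.length ∧ (PySem.Dict.get? (PySem.Dict.mk context) "co_consts").isSome = true
instance (opbytes : List Int) (context : List (String × List Int)) (data : List Int) : Decidable (Pre_convert_co_consts opbytes context data) := by unfold Pre_convert_co_consts; infer_instance

def pvWitness_convert_co_consts : List Int × (List (String × List Int)) × List Int :=
  ([100, 0], [("co_consts", [7, 8])], [])

def Spec_convert_co_consts (opbytes : List Int) (context : List (String × List Int)) (data : List Int) (out : List Int × Int) : Prop := out = convert_co_consts_alt opbytes context data
instance (opbytes : List Int) (context : List (String × List Int)) (data : List Int) (out : List Int × Int) : Decidable (Spec_convert_co_consts opbytes context data out) := by unfold Spec_convert_co_consts; infer_instance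

-- ===== CLAIM (what is proved, stated in full; the proofs are below) =====
def Claim_equal_convert_co_consts : Prop := ∀ (opbytes : List Int) (context : List (String × List Int)) (data : List Int), Dom_convert_co_consts opbytes context data → Pre_convert_co_consts opbytes context data → Spec_convert_co_consts opbytes context data (convert_co_consts opbytes context data)

-- ===== LEMMAS AND PROOFS =====

-- the digit list both sides read: opbytes[-1], opbytes[-3], …  (length n/2, excluding index 0)
def pvDigit (opbytes : List Int) (j : Nat) : Int := opbytes.getD (opbytes.length - 1 - 2 * j) 0

-- proof-side normal form of B's digit-collecting loop
def pvWordsRec (t : Int) : List Int :=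
  if h : 0 < t then PySem.Int.band t 255 :: pvWordsRec (t >>> (8 : Nat)) else []
termination_by t.toNat
decreasing_by exact pvShiftToNat_lt t h

theorem pvWordsB_eq (N : Nat) : ∀ (t : Int) (acc : List Int), t.toNat ≤ N →
    pvWordsB t acc = acc ++ pvWordsRec t := by
  induction N with
  | zero =>
    intro t acc h
    rw [pvWordsB, pvWordsRec, dif_neg (by omega), dif_neg (by omega)]
    simp
  | succ N ih =>
    intro t acc h
    rw [pvWordsB, pvWordsRec]
    by_cases ht : 0 < t
    · rw [dif_pos ht, dif_pos ht, ih _ _ (by have := pvShiftToNat_lt t ht; omega)]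
      simp
    · rw [dif_neg ht, dif_neg ht]; simp

theorem pvLoopA_nonempty (N : Nat) : ∀ (t byte : Int) (res : List Int), t.toNat ≤ N → res ≠ [] →
    pvLoopA t byte res = (pvWordsRec t).reverse.flatMap (fun w => [144, w]) ++ res := by
  induction N with
  | zero =>
    intro t byte res h _
    rw [pvLoopA, pvWordsRec, dif_neg (by omega), dif_neg (by omega)]
    simp
  | succ N ih =>
    intro t byte res h hne
    rw [pvLoopA, pvWordsRec]
    by_cases ht : 0 < t
    · rw [dif_pos ht, dif_pos ht, if_neg hne,
        ih _ _ _ (by have := pvShiftToNat_lt t ht; omega) (by simp)]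
      simp
    · rw [dif_neg ht, dif_neg ht]; simp

-- the common tail of both ports, as a function of the (shared) argument value
theorem pvTail_eq (arg byte : Int) :
    pvLoopA arg byte (if arg = 0 then [byte, 0] else [])
      = ((PySem.List.slice (if arg = 0 then [0] else pvWordsB arg []) (some 1) none).reverse).flatMap
          (fun w => [144, w])
        ++ (match (if arg = 0 then [0] else pvWordsB arg []) with
            | [] => [] | w0 :: _ => [byte, w0]) := by
  rcases lt_trichotomy arg 0 with hlt | heq | hgt
  · rw [if_neg (by omega), if_neg (by omega)]
    rw [pvLoopA, dif_neg (by omega), pvWordsB, dif_neg (by omega)]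
    simp [PySem.List.slice_from_one]
  · subst heq
    rw [if_pos rfl, if_pos rfl, pvLoopA, dif_neg (by omega)]
    simp [PySem.List.slice_from_one]
  · rw [if_neg (by omega), if_neg (by omega)]
    rw [pvWordsB_eq arg.toNat arg [] le_rfl, List.nil_append]
    conv_lhs => rw [pvLoopA, dif_pos hgt]
    rw [if_pos rfl]
    rw [pvLoopA_nonempty (arg >>> (8:Nat)).toNat _ _ _ le_rfl (by simp)]
    conv_rhs => rw [pvWordsRec, dif_pos hgt]
    rw [PySem.List.slice_from_one]
    simp

-- A's index range, written as a map over List.range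
theorem pvRange_eq (n : Nat) (h2 : 2 ≤ n) :
    PySem.List.pyRange (-1) (-(n : Int)) (-2)
      = (List.range (n / 2)).map (fun j : Nat => (-1 : Int) + -2 * (j : Int)) := by
  rw [PySem.List.pyRange, if_neg (by norm_num)]
  have hlt : (-(n : Int)) < -1 := by omega
  simp only [if_neg (by norm_num : ¬ (0:Int) < -2), if_pos hlt]
  have hc : ((-1 - -(n : Int) + -(-2) - 1) / -(-2)).toNat = n / 2 := by norm_num; omega
  rw [hc]

-- B's slice, written as a map over the same List.range
theorem pvSlice_eq (opbytes : List Int) (h2 : 2 ≤ opbytes.length) :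
    PySem.List.slice? opbytes (some (-1)) (some 0) (-2)
      = some ((List.range (opbytes.length / 2)).map (pvDigit opbytes)) := by
  rw [PySem.List.slice?, if_neg (by norm_num), PySem.List.sliceIndices]
  simp only [if_pos (by norm_num : (-2:Int) < 0), if_pos (by norm_num : (-1:Int) < 0),
    if_neg (by norm_num : ¬ (0:Int) < 0), if_neg (by norm_num : ¬ (0:Int) < -2)]
  have hstart : max (-1 + (opbytes.length : Int)) (-1) = (opbytes.length : Int) - 1 := by omega
  have hstop : min 0 ((opbytes.length : Int) - 1) = 0 := by omega
  rw [hstart, hstop, if_pos (by omega : (0:Int) < (opbytes.length : Int) - 1)]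
  have hc : (((opbytes.length : Int) - 1 - 0 + -(-2) - 1) / -(-2)).toNat = opbytes.length / 2 := by norm_num; omega
  rw [hc]
  congr 1
  rw [List.filterMap_eq_map_iff_forall_eq_some.mpr]
  intro j hj
  rw [List.mem_range] at hj
  have hidx : ((opbytes.length : Int) - 1 + -2 * ((j : Nat) : Int)).toNat = opbytes.length - 1 - 2 * j := by omega
  rw [hidx, List.getElem?_eq_getElem (by omega), pvDigit, List.getD_eq_getElem _ _ (by omega)]

-- the enumerate-fold over a mapped range' equals the indexed fold over the range'
theorem pvEnumFold_aux (E : Nat → Int) : ∀ (k m : Nat) (a : Int),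
    (PySem.List.enumerate ((List.range' m k).map E) (m : Int)).foldl
        (fun acc p => PySem.Int.bor acc (p.2 <<< (8 * p.1).toNat)) a
      = (List.range' m k).foldl (fun acc j => PySem.Int.bor acc (E j <<< (8 * j))) a := by
  intro k
  induction k with
  | zero => intro m a; simp [PySem.List.enumerate_nil]
  | succ k ih =>
    intro m a
    rw [List.range'_succ, List.map_cons, PySem.List.enumerate_cons, List.foldl_cons, List.foldl_cons]
    have hm : ((m : Int) + 1) = ((m + 1 : Nat) : Int) := by push_cast; ring
    have hsh : ((8 : Int) * (m : Int)).toNat = 8 * m := by omega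
    rw [hm, ih (m + 1), hsh]

theorem pvEnumFold (E : Nat → Int) (k : Nat) :
    (PySem.List.enumerate ((List.range k).map E)).foldl
        (fun acc p => PySem.Int.bor acc (p.2 <<< (8 * p.1).toNat)) 0
      = (List.range k).foldl (fun acc j => PySem.Int.bor acc (E j <<< (8 * j))) 0 := by
  rw [List.range_eq_range']
  exact pvEnumFold_aux E k 0 0

-- the two argument-decoding folds agree
theorem pvArg_eq (opbytes : List Int) (h2 : 2 ≤ opbytes.length) :
    (PySem.List.pyRange (-1) (-(opbytes.length : Int)) (-2)).foldl
        (fun a i => PySem.Int.bor a (PySem.List.pyGetD opbytes i 0 <<< (i.natAbs / 2 * 8))) 0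
      = (PySem.List.enumerate ((PySem.List.slice? opbytes (some (-1)) (some 0) (-2)).getD [])).foldl
        (fun a p => PySem.Int.bor a (p.2 <<< (8 * p.1).toNat)) 0 := by
  rw [pvRange_eq opbytes.length h2, pvSlice_eq opbytes h2, Option.getD_some]
  rw [pvEnumFold (pvDigit opbytes) (opbytes.length / 2)]
  rw [List.foldl_map (f := fun j : Nat => (-1 : Int) + -2 * (j : Int))]
  apply PySem.List.foldl_congr_mem
  intro acc j hj
  rw [List.mem_range] at hj
  have hk : (2 * j + 1) ≤ opbytes.length := by omega
  have hcast : ((-1 : Int) + -2 * (j : Int)) = -(((2 * j + 1 : Nat)) : Int) := by push_cast; ring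
  rw [hcast, PySem.List.pyGetD_neg_natCast _ _ _ (by omega) hk]
  have hsh : ((-(((2 * j + 1 : Nat)) : Int)).natAbs / 2 * 8) = 8 * j := by
    simp only [Int.natAbs_neg, Int.natAbs_natCast]; omega
  rw [hsh]
  have hidx2 : opbytes.length - (2 * j + 1) = opbytes.length - 1 - 2 * j := by omega
  simp only [hidx2]
  rw [pvDigit, List.getD_eq_getElem _ _ (by omega)]

theorem pvPorts_eq (opbytes : List Int) (context : List (String × List Int)) (data : List Int)
    (h2 : 2 ≤ opbytes.length) :
    convert_co_consts opbytes context data = convert_co_consts_alt opbytes context data := by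
  simp only [convert_co_consts, convert_co_consts_alt]
  rw [← pvArg_eq opbytes h2]
  rw [pvTail_eq]

-- ===== VERDICT (by name: the statement is the Claim_ definition above) =====
theorem convert_co_consts_spec : Claim_equal_convert_co_consts := by
  intro opbytes context data _ hpre
  exact pvPorts_eq opbytes context data hpre.1
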